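-- pv_equiv track=rewrite | github.com/bignamehyp/interview | python/LintCode/AplusB.py | aplusb
-- ===== SOURCE A (Python) =====
-- def aplusb(a, b):
--     # Just submit this code and you will get accepted!
--     carry = 0
--     res = 0
--     for i in range(32):
--         x = (a >> i) & 1
--         y = (b >> i) & 1
--         res |= ((x ^ y) ^ carry) << i
--         carry = (x & y) | (x &carry) | (y & carry)
--     return res
-- ===== SOURCE B (Python) =====
-- def aplusb(a, b):
--     # Closed form: A assembles bits 0..31 of a+b and drops the carry out of
--     # bit 31, i.e. it returns the sum modulo 2**32.
--     return (a + b) & 0xFFFFFFFF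
-- ===== Notes on version B (the rewrite author's own statement) =====
-- stated objective: simpler
-- what changed: Replaced the 32-iteration bitwise full-adder loop (per-bit xor/and carry propagation) with the closed form (a + b) & 0xFFFFFFFF, since the loop computes exactly the low 32 bits of the sum.
import Mathlib
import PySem

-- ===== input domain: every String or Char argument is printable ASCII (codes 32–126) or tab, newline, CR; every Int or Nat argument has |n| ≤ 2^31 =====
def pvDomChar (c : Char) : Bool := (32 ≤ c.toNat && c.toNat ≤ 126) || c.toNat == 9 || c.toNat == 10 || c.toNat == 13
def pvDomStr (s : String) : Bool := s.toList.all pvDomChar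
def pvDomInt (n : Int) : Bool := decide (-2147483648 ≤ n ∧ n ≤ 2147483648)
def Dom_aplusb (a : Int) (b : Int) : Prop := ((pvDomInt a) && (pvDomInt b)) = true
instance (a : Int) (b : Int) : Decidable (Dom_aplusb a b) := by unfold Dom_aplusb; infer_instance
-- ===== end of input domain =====

-- B replaces A's 32-iteration bitwise full-adder loop with the closed form
-- (a + b) & 0xFFFFFFFF (simpler: the loop computes exactly the low 32 bits of the sum).
-- Python's bit operations on unbounded ints are ported with PySem.Int.band/bor/bxor
-- (Python-exact, including on negatives); Python's `>> i` / `<< i` are core Lean's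
-- `>>> i.toNat` / `<<< i.toNat` (exact here: every i produced by range(32) is non-negative).

-- ===== PORT A =====
-- loop body of A: the state is (carry, res), i the loop index
def aplusbStep (a : Int) (b : Int) (s : Int × Int) (i : Int) : Int × Int :=
  let x := PySem.Int.band (a >>> i.toNat) 1
  let y := PySem.Int.band (b >>> i.toNat) 1
  let res := PySem.Int.bor s.2 ((PySem.Int.bxor (PySem.Int.bxor x y) s.1) <<< i.toNat)
  let carry := PySem.Int.bor (PySem.Int.bor (PySem.Int.band x y) (PySem.Int.band x s.1)) (PySem.Int.band y s.1)
  (carry, res)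

def aplusb (a : Int) (b : Int) : Int :=
  ((PySem.List.pyRange 0 32).foldl (aplusbStep a b) (0, 0)).2

-- ===== PORT B =====
def aplusb_alt (a : Int) (b : Int) : Int :=
  PySem.Int.band (a + b) 0xFFFFFFFF

-- ===== PRECONDITION & SPEC =====
def Spec_aplusb (a : Int) (b : Int) (out : Int) : Prop := out = aplusb_alt a b
instance (a : Int) (b : Int) (out : Int) : Decidable (Spec_aplusb a b out) := by unfold Spec_aplusb; infer_instance

-- ===== CLAIM (what is proved, stated in full; the proofs are below) =====
def Claim_equal_aplusb : Prop := ∀ (a : Int) (b : Int), Dom_aplusb a b → Spec_aplusb a b (aplusb a b)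

-- ===== LEMMAS AND PROOFS =====

-- masking with 0xFFFFFFFF = 2^32 - 1 is reduction modulo 2^32 (also for negative s)
lemma band_mask (s : Int) : PySem.Int.band s 0xFFFFFFFF = s % 4294967296 := by
  have h2 : (0xFFFFFFFF : Int).toNat = 2 ^ 32 - 1 := rfl
  rcases le_or_gt 0 s with h | h
  · rw [PySem.Int.band_of_nonneg h (by norm_num), h2, Nat.and_two_pow_sub_one_eq_mod]
    omega
  · have hs : ¬ (0 ≤ s) := by omega
    simp only [PySem.Int.band, if_neg hs, if_pos (by norm_num : (0:Int) ≤ 0xFFFFFFFF)]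
    rw [h2, Nat.land_comm, Nat.and_two_pow_sub_one_eq_mod]
    omega

-- bit extraction: (v >> n) & 1 = (v / 2^n) % 2
lemma band_bit (v : Int) (n : Nat) : PySem.Int.band (v >>> n) 1 = (v / 2 ^ n) % 2 := by
  rw [PySem.Int.band_one, Int.shiftRight_eq_div_pow]
  simp [PySem.Int.mod, Int.fmod_eq_emod]

-- splitting off the n-th bit of a residue modulo 2^(n+1)
lemma emod_pow_succ (a : Int) (n : Nat) :
    a % 2 ^ (n + 1) = a % 2 ^ n + ((a / 2 ^ n) % 2) * 2 ^ n := by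
  have hP : (0:Int) < 2 ^ n := by positivity
  have h1 : a % 2 ^ n + 2 ^ n * (a / 2 ^ n) = a := Int.emod_add_mul_ediv a (2 ^ n)
  have h2 : (a / 2 ^ n) % 2 + 2 * ((a / 2 ^ n) / 2) = a / 2 ^ n := Int.emod_add_mul_ediv _ 2
  have h3 : a = (a % 2 ^ n + ((a / 2 ^ n) % 2) * 2 ^ n) + 2 ^ (n+1) * ((a / 2 ^ n) / 2) := by
    rw [pow_succ]; nlinarith [h1, h2]
  have hm : a % 2 ^ (n+1) = (a % 2 ^ n + ((a / 2 ^ n) % 2) * 2 ^ n) % 2 ^ (n+1) := by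
    conv_lhs => rw [h3]
    rw [Int.add_mul_emod_self_left]
  rw [hm]
  have hr : 0 ≤ a % 2 ^ n ∧ a % 2 ^ n < 2 ^ n :=
    ⟨Int.emod_nonneg _ (by omega), Int.emod_lt_of_pos _ hP⟩
  have hb := Int.emod_two_eq (a / 2 ^ n)
  apply Int.emod_eq_of_lt
  · rcases hb with h | h <;> rw [h] <;> nlinarith
  · rw [pow_succ]; rcases hb with h | h <;> rw [h] <;> nlinarith

-- oring a single bit into position n, above all bits of r
lemma bor_bit (r : Int) (t : Int) (n : Nat) (ht : t = 0 ∨ t = 1)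
    (h0 : 0 ≤ r) (h1 : r < 2 ^ n) :
    PySem.Int.bor r (t <<< n) = r + t * 2 ^ n := by
  rcases ht with h | h <;> subst h
  · simp [Int.shiftLeft_eq, PySem.Int.bor_zero]
  · rw [Int.shiftLeft_eq, one_mul, PySem.Int.bor_of_nonneg h0 (by positivity)]
    have h2 : ((2:Int) ^ n).toNat = 2 ^ n := by
      rw [show ((2:Int) ^ n) = ((2 ^ n : Nat) : Int) by push_cast; ring]
      exact Int.toNat_natCast _
    have h3 : r.toNat < 2 ^ n := by omega
    have h4 := Nat.two_pow_add_eq_or_of_lt h3 1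
    simp only [mul_one] at h4
    rw [h2, Nat.lor_comm, ← h4]
    push_cast
    omega

-- loop invariant: after the first n iterations, res holds the low n bits of a + b
-- and carry is the carry into bit n
lemma aplusb_loop_inv (a b : Int) (n : Nat) :
    ∃ c r : Int,
      (PySem.List.pyRange 0 (n : Int)).foldl (aplusbStep a b) (0, 0) = (c, r) ∧
      (c = 0 ∨ c = 1) ∧ 0 ≤ r ∧ r < 2 ^ n ∧
      2 ^ n * c + r = a % 2 ^ n + b % 2 ^ n := by
  induction n with
  | zero =>
    refine ⟨0, 0, ?_, Or.inl rfl, le_refl _, by norm_num, by simp⟩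
    simp [PySem.List.pyRange]
  | succ n ih =>
    obtain ⟨c, r, hf, hc, hr0, hr1, heq⟩ := ih
    have hsplit : PySem.List.pyRange 0 ((n + 1 : Nat) : Int)
        = PySem.List.pyRange 0 (n : Int) ++ [(n : Int)] := by
      rw [show ((n + 1 : Nat) : Int) = (n : Int) + 1 by push_cast; ring,
        PySem.List.pyRange_one_append 0 (n : Int) ((n : Int) + 1) (by positivity) (by omega)]
      congr 1
      rw [PySem.List.pyRange_one_cons (by omega)]
      simp [PySem.List.pyRange]
    rw [hsplit, List.foldl_append, hf]
    simp only [List.foldl, aplusbStep, Int.toNat_natCast, band_bit]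
    have hx := Int.emod_two_eq (a / 2 ^ n)
    have hy := Int.emod_two_eq (b / 2 ^ n)
    have hP : (0:Int) < 2 ^ n := by positivity
    have ha := emod_pow_succ a n
    have hb := emod_pow_succ b n
    rcases hx with hx | hx <;> rcases hy with hy | hy <;> rcases hc with hcv | hcv <;>
      subst hcv <;> simp only [hx, hy] at ha hb ⊢ <;>
      simp only [show PySem.Int.bxor 0 0 = 0 from rfl, show PySem.Int.bxor 0 1 = 1 from rfl,
        show PySem.Int.bxor 1 0 = 1 from rfl, show PySem.Int.bxor 1 1 = 0 from rfl,
        show PySem.Int.band 0 0 = 0 from rfl, show PySem.Int.band 0 1 = 0 from rfl,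
        show PySem.Int.band 1 0 = 0 from rfl, show PySem.Int.band 1 1 = 1 from rfl,
        show PySem.Int.bor 0 0 = 0 from rfl, show PySem.Int.bor 0 1 = 1 from rfl,
        show PySem.Int.bor 1 0 = 1 from rfl, show PySem.Int.bor 1 1 = 1 from rfl] <;>
      rw [bor_bit r _ n (by norm_num) hr0 hr1] <;>
      refine ⟨_, _, rfl, by norm_num, by nlinarith, by rw [pow_succ]; nlinarith, ?_⟩ <;>
      rw [ha, hb, pow_succ] <;> nlinarith [heq]

-- ===== VERDICT (by name: the statement is the Claim_ definition above) =====
theorem aplusb_spec : Claim_equal_aplusb := by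
  intro a b _
  unfold Spec_aplusb aplusb
  obtain ⟨c, r, hfold, hc, hr0, hr1, heq⟩ := aplusb_loop_inv a b 32
  rw [show ((32:Int)) = ((32:Nat):Int) by norm_num, hfold]
  rw [aplusb_alt, band_mask]
  have hab : (a + b) % 4294967296 = (a % 4294967296 + b % 4294967296) % 4294967296 :=
    Int.add_emod a b _
  norm_num at heq hr1
  omega
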